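-- pv_equiv track=rewrite | github.com/cgilliard/forth | tools/stark_ref/field.py | bb4_pow
-- ===== SOURCE A (Python) =====
-- from typing import List, Tuple
--
-- P = 2013265921                      # 2^31 - 2^27 + 1
--
-- BETA = 11                           # x^4 - 11 irreducible over F_p
--
-- def bb_mul(a: int, b: int) -> int: return (a * b) % P
--
-- def bb4_one()  -> Tuple[int, int, int, int]: return (1, 0, 0, 0)
--
-- def bb4_mul(a, b):
--     """Schoolbook multiplication modulo x^4 - β."""
--     pp = [[bb_mul(a[i], b[j]) for j in range(4)] for i in range(4)]
--     c0 = (pp[0][0] + BETA * (pp[1][3] + pp[2][2] + pp[3][1])) % P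
--     c1 = (pp[0][1] + pp[1][0] + BETA * (pp[2][3] + pp[3][2])) % P
--     c2 = (pp[0][2] + pp[1][1] + pp[2][0] + BETA * pp[3][3]) % P
--     c3 = (pp[0][3] + pp[1][2] + pp[2][1] + pp[3][0]) % P
--     return (c0, c1, c2, c3)
--
-- def bb4_pow(a, n: int):
--     """Square-and-multiply exponentiation in BB⁴."""
--     result = bb4_one()
--     base = a
--     while n > 0:
--         if n & 1:
--             result = bb4_mul(result, base)
--         base = bb4_mul(base, base)
--         n >>= 1
--     return result
-- ===== SOURCE B (Python) =====
-- P = 2013265921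
--
-- BETA = 11
--
-- def poly_mul(x, y):
--     """Multiply in BB4 by full 7-coefficient convolution, then fold x^4 -> BETA."""
--     conv = [0] * 7
--     for i in range(4):
--         for j in range(4):
--             conv[i + j] += x[i] * y[j]
--     reduced = [(conv[k] + BETA * conv[k + 4]) % P for k in range(3)]
--     reduced.append(conv[3] % P)
--     return tuple(reduced)
--
-- def bb4_pow(a, n):
--     """Recursive halving exponentiation in BB4."""
--     if n <= 0:
--         return (1, 0, 0, 0)
--     h = bb4_pow(a, n >> 1)
--     sq = poly_mul(h, h)
--     return poly_mul(sq, a) if n & 1 else sq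
-- ===== Notes on version B (the rewrite author's own statement) =====
-- stated objective: alternative
-- what changed: Replaces A's iterative LSB-first square-and-multiply with a separately squared base and schoolbook bb4_mul formulas by top-down recursive halving (square the recursive result for n>>1, multiply by a when n is odd) over a multiplication that builds the full 7-coefficient convolution in nested loops and then folds x^4 -> BETA.
import Mathlib
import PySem

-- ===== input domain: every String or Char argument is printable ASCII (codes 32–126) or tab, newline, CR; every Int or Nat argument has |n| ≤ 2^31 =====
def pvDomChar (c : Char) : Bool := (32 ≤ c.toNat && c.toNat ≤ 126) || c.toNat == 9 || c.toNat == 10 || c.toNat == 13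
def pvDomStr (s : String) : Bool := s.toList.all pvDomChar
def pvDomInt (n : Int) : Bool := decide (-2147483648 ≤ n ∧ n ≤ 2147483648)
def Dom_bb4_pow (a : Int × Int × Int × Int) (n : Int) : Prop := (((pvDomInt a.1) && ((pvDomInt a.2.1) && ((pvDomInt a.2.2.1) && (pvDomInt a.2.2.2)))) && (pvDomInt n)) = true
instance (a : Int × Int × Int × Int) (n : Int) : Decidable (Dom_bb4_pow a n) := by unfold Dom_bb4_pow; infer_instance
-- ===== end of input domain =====

-- B replaces A's LSB-first iterative square-and-multiply (schoolbook bb4_mul formulas) with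
-- recursive halving exponentiation over a convolution-then-reduce multiplication (objective: alternative).


-- ===== PORT A =====
-- module helpers of Source A
def bb_mul (a b : Int) : Int := (a * b) % 2013265921

def bb4_one : Int × Int × Int × Int := (1, 0, 0, 0)

-- pp[i][j] of the comprehension written out for the literal range(4)
def bb4_mul (a b : Int × Int × Int × Int) : Int × Int × Int × Int :=
  let p00 := bb_mul a.1 b.1;       let p01 := bb_mul a.1 b.2.1
  let p02 := bb_mul a.1 b.2.2.1;   let p03 := bb_mul a.1 b.2.2.2
  let p10 := bb_mul a.2.1 b.1;     let p11 := bb_mul a.2.1 b.2.1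
  let p12 := bb_mul a.2.1 b.2.2.1; let p13 := bb_mul a.2.1 b.2.2.2
  let p20 := bb_mul a.2.2.1 b.1;     let p21 := bb_mul a.2.2.1 b.2.1
  let p22 := bb_mul a.2.2.1 b.2.2.1; let p23 := bb_mul a.2.2.1 b.2.2.2
  let p30 := bb_mul a.2.2.2 b.1;     let p31 := bb_mul a.2.2.2 b.2.1
  let p32 := bb_mul a.2.2.2 b.2.2.1; let p33 := bb_mul a.2.2.2 b.2.2.2
  ((p00 + 11 * (p13 + p22 + p31)) % 2013265921,
   (p01 + p10 + 11 * (p23 + p32)) % 2013265921,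
   (p02 + p11 + p20 + 11 * p33) % 2013265921,
   (p03 + p12 + p21 + p30) % 2013265921)

-- the while-loop of A; for n > 0, Python's n & 1 is n % 2 and n >>= 1 is n / 2
def bb4PowLoop (result base : Int × Int × Int × Int) (n : Int) : Int × Int × Int × Int :=
  if h : n > 0 then
    let result := if n % 2 = 1 then bb4_mul result base else result
    bb4PowLoop result (bb4_mul base base) (n / 2)
  else result
termination_by n.toNat
decreasing_by omega

def bb4_pow (a : Int × Int × Int × Int) (n : Int) : Int × Int × Int × Int :=
  bb4PowLoop bb4_one a n

-- ===== PORT B =====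
-- poly_mul of Source B: conv is the mutable list of 7 coefficients filled by the two nested
-- range(4) loops, then reduced by folding x^4 -> BETA; tuple(reduced) read back out
def polyMul (x y : Int × Int × Int × Int) : Int × Int × Int × Int :=
  let xs := [x.1, x.2.1, x.2.2.1, x.2.2.2]
  let ys := [y.1, y.2.1, y.2.2.1, y.2.2.2]
  let conv := (List.range 4).foldl (fun c i =>
      (List.range 4).foldl (fun c j =>
        c.set (i + j) (c.getD (i + j) 0 + xs.getD i 0 * ys.getD j 0)) c)
    (List.replicate 7 (0 : Int))
  let reduced := ((List.range 3).map
      (fun k => (conv.getD k 0 + 11 * conv.getD (k + 4) 0) % 2013265921))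
    ++ [conv.getD 3 0 % 2013265921]
  (reduced.getD 0 0, reduced.getD 1 0, reduced.getD 2 0, reduced.getD 3 0)

-- recursive halving: for n > 0, Python's n >> 1 is n / 2 and n & 1 is n % 2
def bb4_pow_alt (a : Int × Int × Int × Int) (n : Int) : Int × Int × Int × Int :=
  if _h : n ≤ 0 then (1, 0, 0, 0)
  else
    let h := bb4_pow_alt a (n / 2)
    let sq := polyMul h h
    if n % 2 = 1 then polyMul sq a else sq
termination_by n.toNat
decreasing_by omega

-- ===== PRECONDITION & SPEC =====
def Spec_bb4_pow (a : Int × Int × Int × Int) (n : Int) (out : Int × Int × Int × Int) : Prop := out = bb4_pow_alt a n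
instance (a : Int × Int × Int × Int) (n : Int) (out : Int × Int × Int × Int) : Decidable (Spec_bb4_pow a n out) := by unfold Spec_bb4_pow; infer_instance

-- ===== CLAIM (what is proved, stated in full; the proofs are below) =====
def Claim_equal_bb4_pow : Prop := ∀ (a : Int × Int × Int × Int) (n : Int), Dom_bb4_pow a n → Spec_bb4_pow a n (bb4_pow a n)

-- ===== LEMMAS AND PROOFS =====

-- modular-arithmetic core: transfer component equalities to ZMod and close by `ring`
theorem pvZmodModEq {x y : Int} (h : ((x : ZMod 2013265921)) = (y : ZMod 2013265921)) :
    x % (2013265921 : Int) = y % (2013265921 : Int) := by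
  have := (ZMod.intCast_eq_intCast_iff _ _ _).mp h
  simpa [Int.ModEq] using this

theorem pvCastEmod (a : Int) : (((a % (2013265921:Int)) : Int) : ZMod 2013265921) = (a : ZMod 2013265921) := by
  have : a % (2013265921:Int) ≡ a [ZMOD (2013265921:Int)] := by
    unfold Int.ModEq
    simp [Int.emod_emod_of_dvd]
  exact (ZMod.intCast_eq_intCast_iff _ _ _).mpr (by simpa using this)

-- B's multiplication agrees with A's
theorem polyMul_eq (x y : Int × Int × Int × Int) : polyMul x y = bb4_mul x y := by
  obtain ⟨x0,x1,x2,x3⟩ := x; obtain ⟨y0,y1,y2,y3⟩ := y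
  simp only [polyMul, bb4_mul, bb_mul, List.range_succ, List.range_zero, List.foldl,
    List.map, List.getD, List.set, List.replicate, List.nil_append,
    List.cons_append, List.getElem?_cons_zero, List.getElem?_cons_succ,
    Option.getD_some]
  refine Prod.ext ?_ (Prod.ext ?_ (Prod.ext ?_ ?_)) <;>
    (apply pvZmodModEq; push_cast [pvCastEmod]; norm_num; try ring)

theorem bb4_comm (x y : Int × Int × Int × Int) : bb4_mul x y = bb4_mul y x := by
  obtain ⟨x0,x1,x2,x3⟩ := x; obtain ⟨y0,y1,y2,y3⟩ := y
  simp only [bb4_mul, bb_mul]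
  refine Prod.ext ?_ (Prod.ext ?_ (Prod.ext ?_ ?_)) <;>
    (apply pvZmodModEq; push_cast [pvCastEmod]; ring)

theorem bb4_assoc (x y z : Int × Int × Int × Int) :
    bb4_mul (bb4_mul x y) z = bb4_mul x (bb4_mul y z) := by
  obtain ⟨x0,x1,x2,x3⟩ := x; obtain ⟨y0,y1,y2,y3⟩ := y; obtain ⟨z0,z1,z2,z3⟩ := z
  simp only [bb4_mul, bb_mul]
  refine Prod.ext ?_ (Prod.ext ?_ (Prod.ext ?_ ?_)) <;>
    (apply pvZmodModEq; push_cast [pvCastEmod]; ring)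

theorem bb4_one_one : bb4_mul bb4_one bb4_one = bb4_one := by decide

-- exponent tower shared by both proofs: ppow b k = b * b * … * b (k ≥ 1 factors; unreduced b at k = 1)
def pvPpow (b : Int × Int × Int × Int) : Nat → Int × Int × Int × Int
  | 0 => bb4_one
  | 1 => b
  | (k+2) => bb4_mul (pvPpow b (k+1)) b

theorem pvPpow_succ (b : Int × Int × Int × Int) (k : Nat) (h : 1 ≤ k) :
    pvPpow b (k+1) = bb4_mul (pvPpow b k) b := by
  obtain ⟨j, rfl⟩ : ∃ j, k = j + 1 := ⟨k - 1, by omega⟩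
  rfl

theorem pvPpow_add (b : Int × Int × Int × Int) (m n : Nat) (hm : 1 ≤ m) (hn : 1 ≤ n) :
    pvPpow b (m + n) = bb4_mul (pvPpow b m) (pvPpow b n) := by
  induction n with
  | zero => omega
  | succ n ih =>
    by_cases h1 : n = 0
    · subst h1; exact pvPpow_succ b m hm
    · have hn' : 1 ≤ n := by omega
      rw [show m + (n+1) = (m+n) + 1 by ring, pvPpow_succ b (m+n) (by omega),
          ih hn', bb4_assoc, ← pvPpow_succ b n hn']

theorem pvPpow_sq (b : Int × Int × Int × Int) (m : Nat) (hm : 1 ≤ m) :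
    pvPpow (bb4_mul b b) m = pvPpow b (2 * m) := by
  induction m with
  | zero => omega
  | succ m ih =>
    by_cases h1 : m = 0
    · subst h1; rfl
    · have hm' : 1 ≤ m := by omega
      rw [pvPpow_succ _ m hm', ih hm',
          show 2 * (m + 1) = (2 * m + 1) + 1 by ring,
          pvPpow_succ b (2*m+1) (by omega), pvPpow_succ b (2*m) (by omega), bb4_assoc]

-- squaring a one-times-power term
theorem pvSq_one (p : Int × Int × Int × Int) :
    bb4_mul (bb4_mul bb4_one p) (bb4_mul bb4_one p) = bb4_mul bb4_one (bb4_mul p p) := by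
  calc bb4_mul (bb4_mul bb4_one p) (bb4_mul bb4_one p)
      = bb4_mul bb4_one (bb4_mul p (bb4_mul bb4_one p)) := bb4_assoc bb4_one p (bb4_mul bb4_one p)
    _ = bb4_mul bb4_one (bb4_mul (bb4_mul p bb4_one) p) := by rw [bb4_assoc p bb4_one p]
    _ = bb4_mul bb4_one (bb4_mul (bb4_mul bb4_one p) p) := by rw [bb4_comm p bb4_one]
    _ = bb4_mul bb4_one (bb4_mul bb4_one (bb4_mul p p)) := by rw [bb4_assoc bb4_one p p]
    _ = bb4_mul (bb4_mul bb4_one bb4_one) (bb4_mul p p) := (bb4_assoc bb4_one bb4_one (bb4_mul p p)).symm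
    _ = bb4_mul bb4_one (bb4_mul p p) := by rw [bb4_one_one]

-- A's loop computes result * base^n
theorem bb4PowLoop_eq (r b : Int × Int × Int × Int) (n : Int) (h : 0 < n) :
    bb4PowLoop r b n = bb4_mul r (pvPpow b n.toNat) := by
  induction hk : n.toNat using Nat.strong_induction_on generalizing r b n with
  | _ k ih =>
  rw [bb4PowLoop, dif_pos h]
  by_cases h2 : n / 2 = 0
  · -- n = 1
    have hn1 : n = 1 := by omega
    subst hn1
    rw [bb4PowLoop, dif_neg (by norm_num)]
    norm_num
    have hk1 : k = 1 := by omega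
    subst hk1
    rfl
  · have hpos : 0 < n / 2 := by omega
    have hlt : (n / 2).toNat < k := by omega
    show bb4PowLoop (if n % 2 = 1 then bb4_mul r b else r) (bb4_mul b b) (n / 2) = _
    rw [ih (n / 2).toNat hlt (if n % 2 = 1 then bb4_mul r b else r) (bb4_mul b b) (n / 2) hpos rfl,
        pvPpow_sq b (n / 2).toNat (by omega)]
    have h2m : 2 * (n / 2).toNat = n.toNat - (n % 2).toNat := by omega
    by_cases hodd : n % 2 = 1
    · rw [if_pos hodd, bb4_assoc]
      congr 1
      rw [show (2 : Nat) * (n / 2).toNat = k - 1 by omega]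
      have hadd := pvPpow_add b 1 (k-1) (by omega) (by omega)
      rw [show 1 + (k-1) = k by omega] at hadd
      simpa [pvPpow] using hadd.symm
    · rw [if_neg hodd]
      congr 1
      have : n % 2 = 0 := by omega
      congr 1
      omega

-- B's recursion computes one * a^n
theorem bb4_pow_alt_eq (a : Int × Int × Int × Int) (n : Int) (h : 0 < n) :
    bb4_pow_alt a n = bb4_mul bb4_one (pvPpow a n.toNat) := by
  induction hk : n.toNat using Nat.strong_induction_on generalizing n with
  | _ k ih =>
  rw [bb4_pow_alt, dif_neg (by omega)]
  simp only [polyMul_eq]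
  by_cases h2 : n / 2 = 0
  · -- n = 1
    have hn1 : n = 1 := by omega
    subst hn1
    rw [bb4_pow_alt, dif_pos (by norm_num)]
    have hk1 : k = 1 := by omega
    subst hk1
    norm_num [bb4_one_one]
    rfl
  · have hpos : 0 < n / 2 := by omega
    have hlt : (n / 2).toNat < k := by omega
    rw [ih (n / 2).toNat hlt (n / 2) hpos rfl, pvSq_one,
        show bb4_mul (pvPpow a (n/2).toNat) (pvPpow a (n/2).toNat)
           = pvPpow a (2 * (n/2).toNat) by
          rw [show 2 * (n/2).toNat = (n/2).toNat + (n/2).toNat by ring]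
          exact (pvPpow_add a (n/2).toNat (n/2).toNat (by omega) (by omega)).symm]
    by_cases hodd : n % 2 = 1
    · rw [if_pos hodd, bb4_assoc, ← pvPpow_succ a (2 * (n/2).toNat) (by omega),
          show 2 * (n/2).toNat + 1 = k by omega]
    · rw [if_neg hodd, show 2 * (n/2).toNat = k by omega]

-- ===== VERDICT (by name: the statement is the Claim_ definition above) =====
theorem bb4_pow_spec : Claim_equal_bb4_pow := by
  intro a n _
  unfold Spec_bb4_pow bb4_pow
  by_cases h : n ≤ 0
  · rw [bb4_pow_alt, dif_pos h, bb4PowLoop, dif_neg (by omega)]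
    rfl
  · rw [bb4_pow_alt_eq a n (by omega), bb4PowLoop_eq bb4_one a n (by omega)]
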